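-- pv_equiv track=rewrite | github.com/adam25588/Storage-D | StorageD/goldmanDecode.py | decodeNt
-- ===== SOURCE A (Python) =====
-- def decodeNt(nt_seq):
--     rotate_codes_dic = {'A': ['C', 'G', 'T'], 'C': ['G', 'T', 'A'], 'G': ['T', 'A', 'C'], 'T': ['A', 'C', 'G']}
--     last_nt = "A"
--
--     huffman_str = ""
--     for nt in nt_seq:
--         choose_list = rotate_codes_dic[last_nt]
--         huffman_str += str(choose_list.index(nt))
--         last_nt = nt
--
--     return huffman_str
-- ===== SOURCE B (Python) =====
-- def decodeNt(nt_seq):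
--     order = 'ACGT'
--     idx = [order.index(nt) for nt in nt_seq]
--     return ''.join(str((b - a - 1) % 4) for a, b in zip([0] + idx, idx))
-- ===== Notes on version B (the rewrite author's own statement) =====
-- stated objective: simpler
-- what changed: Replaces A's rotation-table dict and per-step list.index search threaded through a mutable last-nucleotide accumulator by a closed-form arithmetic decode: one index list over 'ACGT' and a pairwise zip computing (cur - prev - 1) mod 4 for each adjacent pair.
-- outside the precondition, e.g. on decodeNt('ACGT'): A raises ValueError, B returns '3000'
import Mathlib
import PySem

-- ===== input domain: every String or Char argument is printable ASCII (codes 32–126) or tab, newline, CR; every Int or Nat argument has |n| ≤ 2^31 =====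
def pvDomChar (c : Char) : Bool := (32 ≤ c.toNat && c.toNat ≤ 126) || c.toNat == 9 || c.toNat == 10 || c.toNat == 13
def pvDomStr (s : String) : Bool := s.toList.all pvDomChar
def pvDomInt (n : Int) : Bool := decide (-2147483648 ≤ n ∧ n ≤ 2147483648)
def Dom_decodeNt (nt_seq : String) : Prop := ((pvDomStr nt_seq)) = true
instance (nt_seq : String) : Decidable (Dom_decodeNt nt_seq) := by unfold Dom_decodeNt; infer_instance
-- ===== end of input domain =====

-- B replaces A's rotation table and per-step list search by a closed-form arithmetic decode over
-- one index list: digit = (index(cur) - index(prev) - 1) mod 4 over zip([0]+idx, idx) (objective: simpler).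

-- ===== PORT A =====
def pvDic : PySem.Dict Char (List Char) :=
  PySem.Dict.ofList [('A', ['C','G','T']), ('C', ['G','T','A']), ('G', ['T','A','C']), ('T', ['A','C','G'])]

def pvStepA (st : Char × String) (nt : Char) : Char × String :=
  let choose := PySem.Dict.getD pvDic st.1 []
  (nt, st.2 ++ PySem.Int.toStr (((PySem.List.index? choose nt).getD 0 : Nat) : Int))

def decodeNt (nt_seq : String) : String :=
  (nt_seq.toList.foldl pvStepA ('A', "")).2

-- ===== PORT B =====
def pvIdx (c : Char) : Int := (((PySem.List.index? (['A','C','G','T'] : List Char) c).getD 0 : Nat) : Int)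

def decodeNt_alt (nt_seq : String) : String :=
  let idx : List Int := nt_seq.toList.map pvIdx
  PySem.Str.join "" (((0 :: idx).zip idx).map (fun p => PySem.Int.toStr (PySem.Int.mod (p.2 - p.1 - 1) 4)))

-- ===== PRECONDITION & SPEC =====
-- Pre_ excludes exactly the inputs on which A raises ValueError: a character outside 'ACGT', or a
-- nucleotide equal to its predecessor (including a leading 'A', since the decoder starts at 'A') —
-- the rotation list of a nucleotide never contains that nucleotide itself, so .index raises there.
def pvIsNt (c : Char) : Bool := c == 'A' || c == 'C' || c == 'G' || c == 'T'

def Pre_decodeNt (nt_seq : String) : Prop :=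
  nt_seq.toList.all pvIsNt = true ∧ List.IsChain (· ≠ ·) ('A' :: nt_seq.toList)
instance (nt_seq : String) : Decidable (Pre_decodeNt nt_seq) := by unfold Pre_decodeNt; infer_instance

def pvWitness_decodeNt : String := "CGT"

def Spec_decodeNt (nt_seq : String) (out : String) : Prop := out = decodeNt_alt nt_seq
instance (nt_seq : String) (out : String) : Decidable (Spec_decodeNt nt_seq out) := by unfold Spec_decodeNt; infer_instance

-- ===== CLAIM (what is proved, stated in full; the proofs are below) =====
def Claim_equal_decodeNt : Prop := ∀ (nt_seq : String), Dom_decodeNt nt_seq → Pre_decodeNt nt_seq → Spec_decodeNt nt_seq (decodeNt nt_seq)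

-- ===== LEMMAS AND PROOFS =====

lemma pvMemOfAll {l : List Char} (h : l.all pvIsNt = true) :
    ∀ c ∈ l, c ∈ (['A','C','G','T'] : List Char) := by
  intro c hc
  have := List.all_eq_true.mp h c hc
  simp [pvIsNt] at this
  rcases this with ((rfl | rfl) | rfl) | rfl <;> simp

-- B's digit chunks (as char lists), one per input nucleotide, threaded by the previous nucleotide.
def pvChunks : Char → List Char → List (List Char)
  | _, [] => []
  | p, c :: t => (PySem.Int.toStr (PySem.Int.mod (pvIdx c - pvIdx p - 1) 4)).toList :: pvChunks c t

lemma pvJoinNil (xs : List (List Char)) : PySem.Chars.join [] xs = xs.flatten := by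
  induction xs with
  | nil => simp [PySem.Chars.join, List.intercalate]
  | cons x t ih =>
    cases t with
    | nil => simp [PySem.Chars.join, List.intercalate]
    | cons y r => rw [PySem.Chars.join_cons_cons]; simp_all

lemma pvZipEq (l : List Char) (p : Char) :
    (((pvIdx p :: l.map pvIdx).zip (l.map pvIdx)).map
      (fun q => (PySem.Int.toStr (PySem.Int.mod (q.2 - q.1 - 1) 4)).toList)) = pvChunks p l := by
  induction l generalizing p with
  | nil => simp [pvChunks]
  | cons c t ih =>
    have hz : ((pvIdx p :: (c :: t).map pvIdx).zip ((c :: t).map pvIdx))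
        = (pvIdx p, pvIdx c) :: ((pvIdx c :: t.map pvIdx).zip (t.map pvIdx)) := rfl
    rw [hz, List.map_cons, ih c]
    rfl

lemma pvDigitEq (p c : Char) (hp : p ∈ (['A','C','G','T'] : List Char))
    (hc : c ∈ (['A','C','G','T'] : List Char)) (hne : p ≠ c) :
    (PySem.Int.toStr (((PySem.List.index? (PySem.Dict.getD pvDic p []) c).getD 0 : Nat) : Int)).toList
      = (PySem.Int.toStr (PySem.Int.mod (pvIdx c - pvIdx p - 1) 4)).toList := by
  simp only [List.mem_cons, List.not_mem_nil, or_false] at hp hc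
  rcases hp with rfl | rfl | rfl | rfl <;> rcases hc with rfl | rfl | rfl | rfl <;>
    first | exact absurd rfl hne | decide

lemma pvLoopA (l : List Char) : ∀ (p : Char) (acc : String),
    p ∈ (['A','C','G','T'] : List Char) → (∀ c ∈ l, c ∈ (['A','C','G','T'] : List Char)) →
    List.IsChain (· ≠ ·) (p :: l) →
    ((l.foldl pvStepA (p, acc)).2).toList = acc.toList ++ (pvChunks p l).flatten := by
  induction l with
  | nil => intro p acc _ _ _; simp [pvChunks]
  | cons c t ih =>
    intro p acc hp hv hch
    obtain ⟨hne, hch'⟩ := List.isChain_cons_cons.mp hch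
    have hc : c ∈ (['A','C','G','T'] : List Char) := hv c (by simp)
    have step : (c :: t).foldl pvStepA (p, acc) = t.foldl pvStepA
        (c, acc ++ PySem.Int.toStr (((PySem.List.index? (PySem.Dict.getD pvDic p []) c).getD 0 : Nat) : Int)) := rfl
    rw [step, ih c _ hc (fun x hx => hv x (List.mem_cons_of_mem _ hx)) hch']
    simp only [pvChunks, List.flatten_cons]
    rw [String.toList_append, pvDigitEq p c hp hc hne, List.append_assoc]

lemma pvAltList (s : String) : (decodeNt_alt s).toList = (pvChunks 'A' s.toList).flatten := by
  have h0 : (0 : Int) = pvIdx 'A' := rfl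
  simp only [decodeNt_alt]
  rw [PySem.Str.toList_join, List.map_map]
  have he : "".toList = ([] : List Char) := rfl
  rw [he, h0]
  have hf : (String.toList ∘ fun p : Int × Int => PySem.Int.toStr (PySem.Int.mod (p.2 - p.1 - 1) 4))
      = fun q : Int × Int => (PySem.Int.toStr (PySem.Int.mod (q.2 - q.1 - 1) 4)).toList := rfl
  rw [hf, pvZipEq, pvJoinNil]

-- ===== VERDICT (by name: the statement is the Claim_ definition above) =====
theorem decodeNt_spec : Claim_equal_decodeNt := by
  intro s _ hpre
  unfold Spec_decodeNt
  apply String.toList_inj.mp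
  rw [pvAltList]
  have := pvLoopA s.toList 'A' "" (by decide) (pvMemOfAll hpre.1) hpre.2
  simpa [decodeNt] using this
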